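-- pv_equiv track=rewrite | github.com/merrygoat/chi4 | cell_list_method.py | loop_over_neighbour_cells
-- ===== SOURCE A (Python) =====
-- def loop_over_neighbour_cells(vector_cell_index, num_cells):
--     """
--     A generator to return the vector index of neighbouring cells
--     :param vector_cell_index: a list of integer cell indices, one for each dimension
--     :param num_cells: a list of integers, the total number of cells in each dimension
--     """
--     for x_neighbour in range(vector_cell_index[0] - 1, vector_cell_index[0] + 2):
--         for y_neighbour in range(vector_cell_index[1] - 1, vector_cell_index[1] + 2):
--             for z_neighbour in range(vector_cell_index[2] - 1, vector_cell_index[2] + 2):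
--                 neighbour_vector_index = [x_neighbour, y_neighbour, z_neighbour]
--                 # Correct neighbour index for boundaries
--                 for index, value in enumerate(neighbour_vector_index):
--                     if value > num_cells[index] - 1:
--                         neighbour_vector_index[index] -= num_cells[index]
--                     if value < 0:
--                         neighbour_vector_index[index] += num_cells[index]
--                 yield neighbour_vector_index
-- ===== SOURCE B (Python) =====
-- def loop_over_neighbour_cells(vector_cell_index, num_cells):
--     """
--     A generator to return the vector index of neighbouring cells.
--     Builds the 27 neighbour vectors by a single staged pass over the
--     dimensions: an accumulator of partial vectors is extended, one
--     dimension at a time, with that dimension's three wrapped indices.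
--     """
--     combos = [[]]
--     for d in range(3):
--         centre = vector_cell_index[d]
--         n = num_cells[d]
--         wrapped = []
--         for v in (centre - 1, centre, centre + 1):
--             w = v
--             if v > n - 1:
--                 w -= n
--             if v < 0:
--                 w += n
--             wrapped.append(w)
--         combos = [prefix + [w] for prefix in combos for w in wrapped]
--     yield from combos
-- ===== Notes on version B (the rewrite author's own statement) =====
-- stated objective: alternative
-- what changed: B builds the 27 neighbour vectors by a single staged pass over the dimensions -- an accumulator of partial vectors is extended, one dimension at a time, with that dimension's three wrapped indices -- instead of three nested range loops that re-run the boundary-correction loop on every full vector in the innermost body.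
import Mathlib
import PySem

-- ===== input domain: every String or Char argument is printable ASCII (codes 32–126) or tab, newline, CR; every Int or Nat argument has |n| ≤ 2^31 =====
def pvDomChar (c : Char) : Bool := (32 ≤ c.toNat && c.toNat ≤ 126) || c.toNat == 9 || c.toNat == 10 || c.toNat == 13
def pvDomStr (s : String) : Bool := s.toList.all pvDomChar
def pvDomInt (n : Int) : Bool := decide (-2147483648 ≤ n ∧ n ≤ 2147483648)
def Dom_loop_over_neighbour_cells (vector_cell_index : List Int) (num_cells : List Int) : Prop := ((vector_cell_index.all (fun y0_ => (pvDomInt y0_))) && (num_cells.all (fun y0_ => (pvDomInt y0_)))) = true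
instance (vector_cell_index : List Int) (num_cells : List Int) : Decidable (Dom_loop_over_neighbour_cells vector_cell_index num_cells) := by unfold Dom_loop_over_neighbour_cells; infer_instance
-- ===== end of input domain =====

-- B replaces the three nested neighbour loops (wrapping every component inside the innermost
-- one) by a single staged pass over the dimensions, extending an accumulator of partial
-- vectors with each dimension's three wrapped indices (alternative decomposition; same
-- yield order and values).

-- ===== PORT A =====
-- the inner 'for index, value in enumerate(...)' correction loop: each entry is read before
-- it is written, so it is exactly an indexed map using the entry's original value
def pvCorrectA (nvi : List Int) (num_cells : List Int) : List Int :=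
  (PySem.List.enumerate nvi).map (fun p =>
    let n := (PySem.List.pyGet? num_cells (p.1 : Int)).getD 0
    let w := if p.2 > n - 1 then p.2 - n else p.2
    if p.2 < 0 then w + n else w)

def loop_over_neighbour_cells (vector_cell_index : List Int) (num_cells : List Int) : List (List Int) :=
  let v0 := (PySem.List.pyGet? vector_cell_index 0).getD 0
  let v1 := (PySem.List.pyGet? vector_cell_index 1).getD 0
  let v2 := (PySem.List.pyGet? vector_cell_index 2).getD 0
  (PySem.List.pyRange (v0 - 1) (v0 + 2) 1).foldl (fun acc x =>
    (PySem.List.pyRange (v1 - 1) (v1 + 2) 1).foldl (fun acc y =>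
      (PySem.List.pyRange (v2 - 1) (v2 + 2) 1).foldl (fun acc z =>
        acc ++ [pvCorrectA [x, y, z] num_cells]) acc) acc) []

-- ===== PORT B =====
def loop_over_neighbour_cells_alt (vector_cell_index : List Int) (num_cells : List Int) : List (List Int) :=
  (List.range 3).foldl (fun combos d =>
    let centre := (PySem.List.pyGet? vector_cell_index (d : Int)).getD 0
    let n := (PySem.List.pyGet? num_cells (d : Int)).getD 0
    let wrapped := [centre - 1, centre, centre + 1].foldl (fun acc v =>
      let v1 := if v > n - 1 then v - n else v
      let v2 := if v < 0 then v1 + n else v1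
      acc ++ [v2]) []
    combos.flatMap (fun pre => wrapped.map (fun w => pre ++ [w]))) [[]]

-- ===== PRECONDITION & SPEC =====
-- Pre_ excludes exactly the inputs on which A raises IndexError: either list shorter than 3.
def Pre_loop_over_neighbour_cells (vector_cell_index : List Int) (num_cells : List Int) : Prop :=
  3 ≤ vector_cell_index.length ∧ 3 ≤ num_cells.length
instance (vector_cell_index : List Int) (num_cells : List Int) : Decidable (Pre_loop_over_neighbour_cells vector_cell_index num_cells) := by unfold Pre_loop_over_neighbour_cells; infer_instance

def pvWitness_loop_over_neighbour_cells : List Int × List Int := ([0, 1, 2], [3, 3, 3])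

def Spec_loop_over_neighbour_cells (vector_cell_index : List Int) (num_cells : List Int) (out : List (List Int)) : Prop := out = loop_over_neighbour_cells_alt vector_cell_index num_cells
instance (vector_cell_index : List Int) (num_cells : List Int) (out : List (List Int)) : Decidable (Spec_loop_over_neighbour_cells vector_cell_index num_cells out) := by unfold Spec_loop_over_neighbour_cells; infer_instance

-- ===== CLAIM (what is proved, stated in full; the proofs are below) =====
def Claim_equal_loop_over_neighbour_cells : Prop := ∀ (vector_cell_index : List Int) (num_cells : List Int), Dom_loop_over_neighbour_cells vector_cell_index num_cells → Pre_loop_over_neighbour_cells vector_cell_index num_cells → Spec_loop_over_neighbour_cells vector_cell_index num_cells (loop_over_neighbour_cells vector_cell_index num_cells)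

-- ===== LEMMAS AND PROOFS =====
theorem pvRange3 (a : Int) : PySem.List.pyRange (a - 1) (a + 2) 1 = [a - 1, a, a + 1] := by
  rw [PySem.List.pyRange_one_cons (by omega), PySem.List.pyRange_one_cons (by omega),
      PySem.List.pyRange_one_cons (by omega), PySem.List.pyRange_one_eq_nil (by omega)]
  norm_num

-- ===== VERDICT (by name: the statement is the Claim_ definition above) =====
theorem loop_over_neighbour_cells_spec : Claim_equal_loop_over_neighbour_cells := by
  intro v nc _ hpre
  obtain ⟨hv, hn⟩ := hpre
  obtain ⟨v0, v1, v2, vr, hveq⟩ : ∃ a b c r, v = a :: b :: c :: r := by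
    match v, hv with | a :: b :: c :: r, _ => exact ⟨a, b, c, r, rfl⟩
  obtain ⟨n0, n1, n2, nr, hneq⟩ : ∃ a b c r, nc = a :: b :: c :: r := by
    match nc, hn with | a :: b :: c :: r, _ => exact ⟨a, b, c, r, rfl⟩
  subst hveq hneq
  unfold Spec_loop_over_neighbour_cells loop_over_neighbour_cells loop_over_neighbour_cells_alt
  have hv1 : ((0:Int) ≤ ↑vr.length + 1 + 1) := by omega
  have hv2 : ((0:Int) ≤ ↑vr.length + 1) := by omega
  have hv3 : ((2:Int) ≤ ↑vr.length + 1 + 1) := by omega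
  have hn1 : ((0:Int) ≤ ↑nr.length + 1 + 1) := by omega
  have hn2 : ((0:Int) ≤ ↑nr.length + 1) := by omega
  have hn3 : ((2:Int) ≤ ↑nr.length + 1 + 1) := by omega
  simp [pvRange3, pvCorrectA, PySem.List.enumerate_cons, PySem.List.enumerate_nil,
        List.range, List.range.loop, List.foldl, List.flatMap, List.map,
        hv1, hv2, hv3, hn1, hn2, hn3]
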